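-- pv_equiv track=rewrite | github.com/MrBrantCode/unitest_baseline | mut_generate/mist_train_taco/taco_10332/solution.py | count_jokes
-- ===== SOURCE A (Python) =====
-- def count_jokes(events):
--     def decode(b, x):
--         try:
--             return int(str(x), b)
--         except:
--             return None
--
--     cnt = {}
--
--     for (b, x) in events:
--         val = decode(b, x)
--         if val is not None:
--             cnt[val] = cnt.get(val, 0) + 1
--
--     ans = sum((x * (x - 1) // 2 for x in cnt.values()))
--     return ans
-- ===== SOURCE B (Python) =====
-- def count_jokes(events):
--     def decode(b, x):
--         try:
--             return int(str(x), b)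
--         except:
--             return None
--
--     vals = sorted(v for v in (decode(b, x) for (b, x) in events) if v is not None)
--     ans = 0
--     i, n = 0, len(vals)
--     while i < n:
--         j = i + 1
--         while j < n and vals[j] == vals[i]:
--             j += 1
--         k = j - i
--         ans += k * (k - 1) // 2
--         i = j
--     return ans
-- ===== Notes on version B (the rewrite author's own statement) =====
-- stated objective: alternative
-- what changed: B drops the dict entirely: it decodes, sorts the decoded values, then scans the sorted list counting each run of equal values and adding k*(k-1)//2 per run.
import Mathlib
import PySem

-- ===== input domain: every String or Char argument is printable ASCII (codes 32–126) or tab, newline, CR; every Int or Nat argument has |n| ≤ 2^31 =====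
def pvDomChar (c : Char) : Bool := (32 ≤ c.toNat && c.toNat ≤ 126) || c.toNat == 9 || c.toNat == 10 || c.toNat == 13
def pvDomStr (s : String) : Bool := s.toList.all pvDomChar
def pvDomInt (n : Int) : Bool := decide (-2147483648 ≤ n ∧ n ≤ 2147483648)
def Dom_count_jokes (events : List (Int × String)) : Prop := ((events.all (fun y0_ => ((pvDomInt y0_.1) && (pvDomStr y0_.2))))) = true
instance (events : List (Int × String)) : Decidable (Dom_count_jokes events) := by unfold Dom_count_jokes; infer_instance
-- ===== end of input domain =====

-- B replaces A's dict-of-counts + closed-form sum by sort-then-run-scan over the decoded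
-- values: it sorts them and adds k*(k-1)//2 per run of equal values; alternative algorithm, O(n log n).


-- ===== PORT A =====
-- decode(b, x) = int(str(x), b) with a bare except returning None; x is already a str,
-- so this is exactly PySem.Int.ofStrBase? x b (none on ValueError, including a bad base).
def count_jokes (events : List (Int × String)) : Int :=
  let cnt : PySem.Dict Int Int :=
    events.foldl (fun cnt p =>
      match PySem.Int.ofStrBase? p.2 p.1 with
      | some val => cnt.insert val (cnt.getD val 0 + 1)
      | none => cnt) PySem.Dict.empty
  ((cnt.values).map (fun x => PySem.Int.floordiv (x * (x - 1)) 2)).sum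

-- ===== PORT B =====
-- the inner while loop 'j += 1 while vals[j] == vals[i]' is the run of the head value:
-- takeWhile/dropWhile split off exactly that run; each run adds k*(k-1)//2.
def pvRunSum : List Int → Int
  | [] => 0
  | v :: t =>
    let k : Int := 1 + ((t.takeWhile (fun y => y == v)).length : Int)
    PySem.Int.floordiv (k * (k - 1)) 2 + pvRunSum (t.dropWhile (fun y => y == v))
termination_by l => l.length
decreasing_by
  simp only [List.length_cons]
  exact Nat.lt_succ_of_le (List.Sublist.length_le (List.dropWhile_sublist _))

def count_jokes_alt (events : List (Int × String)) : Int :=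
  pvRunSum (PySem.List.sorted
    (events.filterMap (fun p : Int × String => PySem.Int.ofStrBase? p.2 p.1))
    (fun x => x) false)

-- ===== PRECONDITION & SPEC =====
def Spec_count_jokes (events : List (Int × String)) (out : Int) : Prop := out = count_jokes_alt events
instance (events : List (Int × String)) (out : Int) : Decidable (Spec_count_jokes events out) := by unfold Spec_count_jokes; infer_instance

-- ===== CLAIM (what is proved, stated in full; the proofs are below) =====
def Claim_equal_count_jokes : Prop := ∀ (events : List (Int × String)), Dom_count_jokes events → Spec_count_jokes events (count_jokes events)

-- ===== LEMMAS AND PROOFS =====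

def pvTri (x : Int) : Int := PySem.Int.floordiv (x * (x - 1)) 2

def pvTsum (d : PySem.Dict Int Int) : Int := (d.values.map pvTri).sum

-- reference count of equal pairs: for each element, the equal elements after it
def pairsRef : List Int → Int
  | [] => 0
  | x :: t => (t.count x : Int) + pairsRef t

theorem pvTri_succ (c : Int) : pvTri (c + 1) = pvTri c + c := by
  unfold pvTri
  rw [PySem.Int.floordiv_eq_ediv_of_pos (by norm_num), PySem.Int.floordiv_eq_ediv_of_pos (by norm_num),
      show (c + 1) * (c + 1 - 1) = c * (c - 1) + c * 2 by ring,
      Int.add_mul_ediv_right _ _ (by norm_num : (2 : Int) ≠ 0)]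

-- replacing the unique entry with key k by (k, c+1) adds c to the pvTri-sum of the values
theorem pv_sum_replace (k c : Int) :
    ∀ (l : List (Int × Int)), (l.map (·.1)).Nodup → (k, c) ∈ l →
      ((l.map (fun p => if (p.1 == k) = true then (k, c + 1) else p)).map (fun p => pvTri p.2)).sum
        = (l.map (fun p => pvTri p.2)).sum + c := by
  intro l
  induction l with
  | nil => intro _ h; simp at h
  | cons p t ih =>
    intro hnd hmem
    simp only [List.map_cons, List.nodup_cons, List.mem_map] at hnd
    simp only [List.map_cons, List.sum_cons]
    rcases List.mem_cons.mp hmem with heq | hmem'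
    · subst heq
      have hrest : List.map (fun p => if (p.1 == k) = true then (k, c + 1) else p) t
          = List.map id t :=
        List.map_congr_left (fun q hq => by
          have hq1 : q.1 ≠ k := fun h => hnd.1 ⟨q, hq, h⟩
          simp [hq1])
      have hhead : (if (((k, c) : Int × Int).1 == k) = true then (k, c + 1) else (k, c)) = (k, c + 1) := by
        simp
      rw [hhead, hrest, List.map_id]
      show pvTri (c + 1) + _ = pvTri c + _ + c
      rw [pvTri_succ]; ring
    · have hne : p.1 ≠ k := fun h => hnd.1 ⟨(k, c), hmem', by simp [h]⟩
      have hhead : (if (p.1 == k) = true then (k, c + 1) else p) = p := by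
        simp [hne]
      rw [hhead, ih hnd.2 hmem']; ring

theorem pvTsum_insert (d : PySem.Dict Int Int) (k : Int) (hnd : d.keys.Nodup) :
    pvTsum (d.insert k (d.getD k 0 + 1)) = pvTsum d + d.getD k 0 := by
  unfold pvTsum
  cases hc : d.contains k with
  | false =>
    rw [PySem.Dict.getD_of_not_contains d 0 hc]
    rw [show d.insert k (0 + 1) = d.insert k 1 by norm_num]
    have hit : (d.insert k 1).items = d.items ++ [(k, 1)] :=
      PySem.Dict.items_insert_of_not_contains d 1 hc
    simp only [PySem.Dict.values, hit, List.map_append, List.sum_append]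
    norm_num [pvTri, PySem.Int.floordiv]
  | true =>
    obtain ⟨c, hg⟩ : ∃ c, d.get? k = some c := by
      have h := PySem.Dict.contains_eq_isSome_get? d k
      rw [hc] at h
      exact Option.isSome_iff_exists.mp h.symm
    have hgd : d.getD k 0 = c := PySem.Dict.getD_of_get?_eq_some d 0 hg
    have hmem : (k, c) ∈ d.items := PySem.Dict.mem_items_of_get?_eq_some d hg
    have hitems := PySem.Dict.items_insert_of_contains d (d.getD k 0 + 1) hc
    rw [hgd] at hitems ⊢
    simp only [PySem.Dict.values, hitems, List.map_map]
    have hrepl := pv_sum_replace k c d.items hnd hmem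
    simpa [Function.comp] using hrepl

-- A's event fold, with the skipped `none`s removed
theorem pv_foldA (events : List (Int × String)) :
    events.foldl (fun (cnt : PySem.Dict Int Int) p =>
        match PySem.Int.ofStrBase? p.2 p.1 with
        | some val => cnt.insert val (cnt.getD val 0 + 1)
        | none => cnt) PySem.Dict.empty
      = (events.filterMap (fun p : Int × String => PySem.Int.ofStrBase? p.2 p.1)).foldl
          (fun cnt val => cnt.insert val (cnt.getD val 0 + 1)) PySem.Dict.empty := by
  suffices h : ∀ (l : List (Int × String)) (init : PySem.Dict Int Int),
      l.foldl (fun cnt p =>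
        match PySem.Int.ofStrBase? p.2 p.1 with
        | some val => cnt.insert val (cnt.getD val 0 + 1)
        | none => cnt) init
      = (l.filterMap (fun p : Int × String => PySem.Int.ofStrBase? p.2 p.1)).foldl
          (fun cnt val => cnt.insert val (cnt.getD val 0 + 1)) init from h events _
  intro l
  induction l with
  | nil => intro init; rfl
  | cons p t ih =>
    intro init
    simp only [List.foldl_cons, List.filterMap_cons]
    cases h : PySem.Int.ofStrBase? p.2 p.1 with
    | some v => simp [ih]
    | none => simp [ih]

theorem pairsRef_append (a b : List Int) :
    pairsRef (a ++ b) = pairsRef a + pairsRef b + (a.map (fun x => (b.count x : Int))).sum := by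
  induction a with
  | nil => simp [pairsRef]
  | cons x t ih =>
    simp only [List.cons_append, pairsRef, List.count_append, List.map_cons, List.sum_cons, ih]
    push_cast
    ring

theorem pairsRef_append_singleton (l : List Int) (v : Int) :
    pairsRef (l ++ [v]) = pairsRef l + (l.count v : Int) := by
  induction l with
  | nil => simp [pairsRef]
  | cons x t ih =>
    simp only [List.cons_append, pairsRef, List.count_append,
      List.count_cons, ih]
    by_cases hxv : v = x
    · subst hxv
      simp only [beq_self_eq_true, if_true, List.count_nil]
      push_cast; ring
    · simp only [beq_iff_eq, hxv, Ne.symm hxv, if_false, List.count_nil]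
      push_cast; ring

theorem pairsRef_perm {l l' : List Int} (h : l.Perm l') : pairsRef l = pairsRef l' := by
  induction h with
  | nil => rfl
  | cons x h ih => simp [pairsRef, h.count_eq, ih]
  | swap x y l =>
    simp only [pairsRef, List.count_cons]
    by_cases hxy : x = y
    · subst hxy
      simp only [beq_self_eq_true, if_true]
    · simp only [beq_iff_eq, hxy, Ne.symm hxy, if_false]
      push_cast; ring
  | trans _ _ ih1 ih2 => exact ih1.trans ih2

-- A's dict sum equals the reference pair count
theorem pvTsum_counter (l : List Int) : pvTsum (PySem.Dict.counter l) = pairsRef l := by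
  induction l using List.reverseRecOn with
  | nil => rfl
  | append_singleton ws v ih =>
    have hc : PySem.Dict.counter (ws ++ [v])
        = (PySem.Dict.counter ws).insert v ((PySem.Dict.counter ws).getD v 0 + 1) := by
      rw [PySem.Dict.counter_append_singleton]; rfl
    rw [hc, pvTsum_insert _ _ (PySem.Dict.nodup_keys_counter ws), ih,
        PySem.Dict.getD_counter, pairsRef_append_singleton]

theorem pairsRef_replicate (m : Nat) (v : Int) :
    pairsRef (List.replicate m v) = pvTri (m : Int) := by
  induction m with
  | zero => simp [pairsRef, pvTri, PySem.Int.floordiv]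
  | succ n ih =>
    rw [List.replicate_succ]
    simp only [pairsRef, List.count_replicate, ih]
    push_cast
    rw [pvTri_succ]
    simp
    ring

-- on a nondecreasing list the run scan computes the reference pair count
theorem pvRunSum_eq_pairsRef : ∀ (s : List Int), s.Pairwise (· ≤ ·) → pvRunSum s = pairsRef s
  | [], _ => by simp [pvRunSum, pairsRef]
  | v :: t, hs => by
    have hpt : t.Pairwise (· ≤ ·) := hs.of_cons
    have hvle : ∀ y ∈ t, v ≤ y := fun y hy => List.rel_of_pairwise_cons hs hy
    have hsplit : t = t.takeWhile (fun y => y == v) ++ t.dropWhile (fun y => y == v) :=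
      (List.takeWhile_append_dropWhile).symm
    have htwv : ∀ y ∈ t.takeWhile (fun y => y == v), y = v := fun y hy => by
      simpa using List.mem_takeWhile_imp hy
    have htwrep : t.takeWhile (fun y => y == v)
        = List.replicate (t.takeWhile (fun y => y == v)).length v :=
      List.eq_replicate_of_mem htwv
    have hdwpw : (t.dropWhile (fun y => y == v)).Pairwise (· ≤ ·) :=
      hpt.sublist (List.dropWhile_sublist _)
    -- every element of the rest is strictly greater than v
    have hdwgt : ∀ y ∈ t.dropWhile (fun y => y == v), v < y := by
      cases hd : t.dropWhile (fun y => y == v) with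
      | nil => intro y hy; simp at hy
      | cons d r =>
        intro y hy
        have hdne : ¬ ((d == v) = true) := by
          have h0 := List.head?_dropWhile_not (fun y => y == v) t
          rw [hd] at h0; simpa using h0
        have hdmem : d ∈ t := by
          rw [hsplit, hd]; exact List.mem_append_right _ List.mem_cons_self
        have hdgt : v < d := lt_of_le_of_ne (hvle d hdmem)
          (fun h => hdne (by rw [h]; exact beq_self_eq_true d))
        rcases List.mem_cons.mp hy with rfl | hyr
        · exact hdgt
        · exact lt_of_lt_of_le hdgt (List.rel_of_pairwise_cons (hd ▸ hdwpw) hyr)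
    have hcntdw : (t.dropWhile (fun y => y == v)).count v = 0 :=
      List.count_eq_zero.mpr (fun hv => lt_irrefl v (hdwgt v hv))
    have hcnttw : (t.takeWhile (fun y => y == v)).count v
        = (t.takeWhile (fun y => y == v)).length := by
      conv_lhs => rw [htwrep]
      rw [List.count_replicate]
      simp
    have ihdw : pvRunSum (t.dropWhile (fun y => y == v))
        = pairsRef (t.dropWhile (fun y => y == v)) :=
      pvRunSum_eq_pairsRef (t.dropWhile (fun y => y == v)) hdwpw
    -- cross term between the run and the rest vanishes
    have hcross : ((t.takeWhile (fun y => y == v)).map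
        (fun x => (((t.dropWhile (fun y => y == v)).count x : Nat) : Int))).sum = 0 := by
      rw [show (t.takeWhile (fun y => y == v)).map
            (fun x => (((t.dropWhile (fun y => y == v)).count x : Nat) : Int))
          = (t.takeWhile (fun y => y == v)).map (fun _ => (0 : Int)) from
        List.map_congr_left (fun x hx => by rw [htwv x hx, hcntdw]; rfl)]
      simp
    calc pvRunSum (v :: t)
        = pvTri (1 + ((t.takeWhile (fun y => y == v)).length : Int))
            + pvRunSum (t.dropWhile (fun y => y == v)) := by
          rw [pvRunSum]
          simp only [pvTri]
      _ = pvTri (((t.takeWhile (fun y => y == v)).length : Int) + 1)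
            + pairsRef (t.dropWhile (fun y => y == v)) := by
          rw [ihdw, add_comm (1 : Int)]
      _ = pvTri ((t.takeWhile (fun y => y == v)).length : Int)
            + ((t.takeWhile (fun y => y == v)).length : Int)
            + pairsRef (t.dropWhile (fun y => y == v)) := by rw [pvTri_succ]
      _ = pairsRef (v :: t) := by
          conv_rhs => rw [pairsRef, hsplit, pairsRef_append, List.count_append]
          rw [hcnttw, hcntdw]
          rw [show pairsRef (t.takeWhile (fun y => y == v))
              = pvTri ((t.takeWhile (fun y => y == v)).length : Int) by
            conv_lhs => rw [htwrep]
            rw [pairsRef_replicate]]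
          rw [hcross]
          push_cast
          ring
termination_by s => s.length
decreasing_by
  simp only [List.length_cons]
  exact Nat.lt_succ_of_le (List.Sublist.length_le (List.dropWhile_sublist _))

-- ===== VERDICT (by name: the statement is the Claim_ definition above) =====
theorem count_jokes_spec : Claim_equal_count_jokes := by
  intro events _
  show count_jokes events = count_jokes_alt events
  unfold count_jokes count_jokes_alt
  rw [pv_foldA, PySem.Dict.foldl_insert_getD_add_one_eq_counter]
  set vs := events.filterMap (fun p : Int × String => PySem.Int.ofStrBase? p.2 p.1)
  have hsorted : (PySem.List.sorted vs (fun x => x) false).Pairwise (· ≤ ·) := by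
    have := PySem.List.sorted_pairwise vs (fun x => x)
    simpa using this
  rw [pvRunSum_eq_pairsRef _ hsorted,
      pairsRef_perm (PySem.List.sorted_perm vs (fun x => x) false)]
  exact pvTsum_counter vs
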